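-- pv_equiv track=rewrite | github.com/viroovr/baekjoon | Platinum/Platinum V/23291.py | adjust_fishes
-- ===== SOURCE A (Python) =====
-- directions = [(-1, 0), (1, 0), (0, -1), (0, 1)]
--
-- def adjust_fishes(rotated_tanks, degrees):
--     R = len(degrees)
--     deltas = [[0] * degrees[r] for r in range(R)]
--
--     for r in range(R):
--         for c in range(degrees[r]):
--             cur_temp = rotated_tanks[r][c]
--             for dr, dc in directions:
--                 nr, nc = r + dr, c + dc
--                 if 0 <= nr < R and 0 <= nc < degrees[nr] and cur_temp > rotated_tanks[nr][nc]:
--                     diff = (cur_temp - rotated_tanks[nr][nc]) // 5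
--                     if diff > 0:
--                         deltas[r][c] -= diff
--                         deltas[nr][nc] += diff
--
--     for r in range(R):
--         for c in range(degrees[r]):
--             rotated_tanks[r][c] += deltas[r][c]
--
--     return rotated_tanks
-- ===== SOURCE B (Python) =====
-- def adjust_fishes(rotated_tanks, degrees):
--     R = len(degrees)
--
--     def delta(r, c):
--         t = rotated_tanks[r][c]
--         s = 0
--         for nr, nc in ((r - 1, c), (r + 1, c), (r, c - 1), (r, c + 1)):
--             if 0 <= nr < R and 0 <= nc < degrees[nr]:
--                 u = rotated_tanks[nr][nc]
--                 if t > u: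
--                     s -= (t - u) // 5
--                 elif u > t:
--                     s += (u - t) // 5
--         return s
--
--     new_vals = [[rotated_tanks[r][c] + delta(r, c) for c in range(degrees[r])]
--                 for r in range(R)]
--
--     for r in range(R):
--         for c in range(degrees[r]):
--             rotated_tanks[r][c] = new_vals[r][c]
--
--     return rotated_tanks
-- ===== Notes on version B (the rewrite author's own statement) =====
-- stated objective: alternative
-- what changed: A scatters per-edge heat transfers into a mutable deltas matrix (each cell pushes -diff to itself and +diff to every cooler neighbour, touching two deltas cells per edge); B has no deltas matrix at all: it computes each cell's net delta in closed form by gathering the signed contribution of its four neighbours, builds the new value table in one comprehension, and writes it back.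
import Mathlib
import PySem

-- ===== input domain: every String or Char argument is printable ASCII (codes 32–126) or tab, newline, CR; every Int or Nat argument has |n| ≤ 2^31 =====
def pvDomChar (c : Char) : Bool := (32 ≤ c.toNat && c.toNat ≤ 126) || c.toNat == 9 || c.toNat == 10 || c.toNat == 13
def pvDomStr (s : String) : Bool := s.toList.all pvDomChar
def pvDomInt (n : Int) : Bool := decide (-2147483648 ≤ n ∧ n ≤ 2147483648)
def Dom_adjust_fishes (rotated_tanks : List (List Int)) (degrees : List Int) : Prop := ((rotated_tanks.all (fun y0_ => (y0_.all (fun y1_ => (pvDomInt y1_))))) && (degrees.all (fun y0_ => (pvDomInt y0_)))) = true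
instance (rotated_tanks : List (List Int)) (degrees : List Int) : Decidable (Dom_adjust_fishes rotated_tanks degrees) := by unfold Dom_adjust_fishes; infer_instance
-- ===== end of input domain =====

-- B replaces A's scatter of per-edge deltas into a mutable deltas matrix by a per-cell
-- gather (each cell's net delta computed in closed form from its four neighbours);
-- objective: alternative decomposition, same cost. Both A and B mutate rotated_tanks in
-- place in the same way; the theorems below are about the return value.

-- ===== PORT A =====
-- shared indexing helpers (Python m[r], m[r][c], degrees[r]; guarded in-range at use sites)
def pvGetRow (m : List (List Int)) (r : Int) : List Int := (PySem.List.pyGet? m r).getD []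
def pvGet (m : List (List Int)) (r c : Int) : Int := (PySem.List.pyGet? (pvGetRow m r) c).getD 0
def pvDeg (degrees : List Int) (r : Int) : Int := (PySem.List.pyGet? degrees r).getD 0
-- m[r][c] = v  (used only with 0 ≤ r, 0 ≤ c in range)
def pvSet2 (m : List (List Int)) (r c : Int) (v : Int) : List (List Int) :=
  m.set r.toNat ((pvGetRow m r).set c.toNat v)
-- m[r][c] += v
def pvAdd2 (m : List (List Int)) (r c : Int) (v : Int) : List (List Int) :=
  pvSet2 m r c (pvGet m r c + v)

def pvDirs : List (Int × Int) := [(-1, 0), (1, 0), (0, -1), (0, 1)]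

-- body of A's innermost loop (one direction of one cell)
def pvStepDir (tanks : List (List Int)) (degrees : List Int) (R r c : Int)
    (deltas : List (List Int)) (d : Int × Int) : List (List Int) :=
  let cur := pvGet tanks r c
  let nr := r + d.1
  let nc := c + d.2
  if 0 ≤ nr ∧ nr < R ∧ 0 ≤ nc ∧ nc < pvDeg degrees nr ∧ pvGet tanks nr nc < cur then
    let diff := PySem.Int.floordiv (cur - pvGet tanks nr nc) 5
    if 0 < diff then pvAdd2 (pvAdd2 deltas r c (-diff)) nr nc diff
    else deltas
  else deltas

def adjust_fishes (rotated_tanks : List (List Int)) (degrees : List Int) : List (List Int) :=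
  let R : Int := (degrees.length : Int)
  let deltas0 : List (List Int) :=
    (PySem.List.pyRange 0 R).map (fun r => PySem.List.pyRepeat [(0 : Int)] (pvDeg degrees r))
  let deltas := (PySem.List.pyRange 0 R).foldl (fun acc r =>
      (PySem.List.pyRange 0 (pvDeg degrees r)).foldl (fun acc c =>
        pvDirs.foldl (fun acc d => pvStepDir rotated_tanks degrees R r c acc d) acc) acc) deltas0
  (PySem.List.pyRange 0 R).foldl (fun acc r =>
      (PySem.List.pyRange 0 (pvDeg degrees r)).foldl (fun acc c =>
        pvAdd2 acc r c (pvGet deltas r c)) acc) rotated_tanks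

-- ===== PORT B =====
def pvNeighbors (r c : Int) : List (Int × Int) := [(r - 1, c), (r + 1, c), (r, c - 1), (r, c + 1)]

-- B's per-cell gathered delta
def pvDelta (tanks : List (List Int)) (degrees : List Int) (R r c : Int) : Int :=
  let t := pvGet tanks r c
  (pvNeighbors r c).foldl (fun s n =>
    if 0 ≤ n.1 ∧ n.1 < R ∧ 0 ≤ n.2 ∧ n.2 < pvDeg degrees n.1 then
      let u := pvGet tanks n.1 n.2
      if u < t then s - PySem.Int.floordiv (t - u) 5
      else if t < u then s + PySem.Int.floordiv (u - t) 5
      else s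
    else s) 0

def adjust_fishes_alt (rotated_tanks : List (List Int)) (degrees : List Int) : List (List Int) :=
  let R : Int := (degrees.length : Int)
  let newVals : List (List Int) := (PySem.List.pyRange 0 R).map (fun r =>
      (PySem.List.pyRange 0 (pvDeg degrees r)).map (fun c =>
        pvGet rotated_tanks r c + pvDelta rotated_tanks degrees R r c))
  (PySem.List.pyRange 0 R).foldl (fun acc r =>
      (PySem.List.pyRange 0 (pvDeg degrees r)).foldl (fun acc c =>
        pvSet2 acc r c (pvGet newVals r c)) acc) rotated_tanks

-- ===== PRECONDITION & SPEC =====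
-- Pre_ excludes exactly the inputs where Python A raises IndexError: some row with a
-- positive degree is missing from rotated_tanks or shorter than its degree.
def Pre_adjust_fishes (rotated_tanks : List (List Int)) (degrees : List Int) : Prop :=
  ∀ r : Nat, r < degrees.length → 0 < pvDeg degrees (r : Int) →
    r < rotated_tanks.length ∧ pvDeg degrees (r : Int) ≤ ((pvGetRow rotated_tanks (r : Int)).length : Int)
instance (rotated_tanks : List (List Int)) (degrees : List Int) : Decidable (Pre_adjust_fishes rotated_tanks degrees) := by
  unfold Pre_adjust_fishes; infer_instance

def pvWitness_adjust_fishes : List (List Int) × List Int := ([[25, 3], [4, 9]], [2, 2])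

def Spec_adjust_fishes (rotated_tanks : List (List Int)) (degrees : List Int) (out : List (List Int)) : Prop := out = adjust_fishes_alt rotated_tanks degrees
instance (rotated_tanks : List (List Int)) (degrees : List Int) (out : List (List Int)) : Decidable (Spec_adjust_fishes rotated_tanks degrees out) := by unfold Spec_adjust_fishes; infer_instance

-- ===== CLAIM (what is proved, stated in full; the proofs are below) =====
def Claim_equal_adjust_fishes : Prop := ∀ (rotated_tanks : List (List Int)) (degrees : List Int), Dom_adjust_fishes rotated_tanks degrees → Pre_adjust_fishes rotated_tanks degrees → Spec_adjust_fishes rotated_tanks degrees (adjust_fishes rotated_tanks degrees)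

-- ===== LEMMAS AND PROOFS =====

-- the amount A's innermost-loop body for cell (r,c) and direction d adds at position (pi,pj)
def pvContribD (tanks : List (List Int)) (degrees : List Int) (R r c : Int) (d : Int × Int)
    (pi pj : Int) : Int :=
  let cur := pvGet tanks r c
  let nr := r + d.1
  let nc := c + d.2
  if 0 ≤ nr ∧ nr < R ∧ 0 ≤ nc ∧ nc < pvDeg degrees nr ∧ pvGet tanks nr nc < cur then
    let diff := PySem.Int.floordiv (cur - pvGet tanks nr nc) 5
    if 0 < diff then (if pi = r ∧ pj = c then -diff else 0) + (if pi = nr ∧ pj = nc then diff else 0)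
    else 0
  else 0

def pvContrib (tanks : List (List Int)) (degrees : List Int) (R r c pi pj : Int) : Int :=
  (pvDirs.map (fun d => pvContribD tanks degrees R r c d pi pj)).sum

-- basic get/set lemmas ------------------------------------------------------

theorem pvGet_eq (m : List (List Int)) {r c : Int} (hr : 0 ≤ r) (hc : 0 ≤ c) :
    pvGet m r c = ((m[r.toNat]?.getD [])[c.toNat]?).getD 0 := by
  simp [pvGet, pvGetRow, PySem.List.pyGet?_of_nonneg _ hr, PySem.List.pyGet?_of_nonneg _ hc]

theorem pvGetRow_eq (m : List (List Int)) {r : Int} (hr : 0 ≤ r) :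
    pvGetRow m r = (m[r.toNat]?).getD [] := by
  simp [pvGetRow, PySem.List.pyGet?_of_nonneg _ hr]

theorem shape_pvSet2 (m : List (List Int)) {r : Int} (c v : Int) (hr : 0 ≤ r) :
    (pvSet2 m r c v).map List.length = m.map List.length := by
  apply List.ext_getElem?
  intro i
  simp only [pvSet2, List.map_set, List.getElem?_set, List.length_map]
  by_cases hi : r.toNat = i
  · subst hi
    by_cases hlt : r.toNat < m.length
    · simp [if_pos hlt, List.length_set, pvGetRow_eq m hr,
        List.getElem?_map, List.getElem?_eq_getElem hlt]
    · simp [hlt]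
  · simp [hi]

theorem pvGet_pvSet2 (m : List (List Int)) {r c : Int} (r' c' v : Int)
    (hr : 0 ≤ r) (hc : 0 ≤ c) (hr' : 0 ≤ r') (hc' : 0 ≤ c')
    (hrm : r.toNat < m.length) (hcm : c.toNat < (pvGetRow m r).length) :
    pvGet (pvSet2 m r c v) r' c' = if r' = r ∧ c' = c then v else pvGet m r' c' := by
  rw [pvGet_eq _ hr' hc', pvGet_eq m hr' hc']
  simp only [pvSet2, List.getElem?_set]
  by_cases h1 : r' = r
  · have ht : r.toNat = r'.toNat := by omega
    rw [if_pos ht, if_pos (ht ▸ hrm)]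
    simp only [Option.getD_some]
    rw [List.getElem?_set]
    by_cases h2 : c' = c
    · have htc : c.toNat = c'.toNat := by omega
      rw [if_pos htc, if_pos hcm, if_pos ⟨h1, h2⟩]
      simp
    · have htc : ¬ c.toNat = c'.toNat := by omega
      rw [if_neg htc, if_neg (by tauto : ¬ (r' = r ∧ c' = c))]
      rw [pvGetRow_eq m hr, h1]
  · have ht : ¬ r.toNat = r'.toNat := by omega
    rw [if_neg ht, if_neg (by tauto : ¬ (r' = r ∧ c' = c))]

theorem pvGet_pvAdd2 (m : List (List Int)) {r c : Int} (r' c' v : Int)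
    (hr : 0 ≤ r) (hc : 0 ≤ c) (hr' : 0 ≤ r') (hc' : 0 ≤ c')
    (hrm : r.toNat < m.length) (hcm : c.toNat < (pvGetRow m r).length) :
    pvGet (pvAdd2 m r c v) r' c' = pvGet m r' c' + (if r' = r ∧ c' = c then v else 0) := by
  rw [pvAdd2, pvGet_pvSet2 m r' c' _ hr hc hr' hc' hrm hcm]
  by_cases h : r' = r ∧ c' = c
  · rw [if_pos h, if_pos h, h.1, h.2]
  · rw [if_neg h, if_neg h, add_zero]

-- generic fold lemmas -------------------------------------------------------

-- additive fold: every step adds g x at the observed position and preserves P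
theorem foldl_get_add {ι : Type} (L : List ι) (step : List (List Int) → ι → List (List Int))
    (g : ι → Int) (P : List (List Int) → Prop) (m : List (List Int)) (pi pj : Int)
    (hP : P m)
    (hstep : ∀ m' x, P m' → x ∈ L →
      pvGet (step m' x) pi pj = pvGet m' pi pj + g x ∧ P (step m' x)) :
    pvGet (L.foldl step m) pi pj = pvGet m pi pj + (L.map g).sum ∧ P (L.foldl step m) := by
  induction L generalizing m with
  | nil => exact ⟨by simp, hP⟩
  | cons x xs ih =>
    have h1 := hstep m x hP (by simp)
    have h2 := ih (step m x) h1.2 (fun m' y hy hmem => hstep m' y hy (by simp [hmem]))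
    simp only [List.foldl_cons, List.map_cons, List.sum_cons]
    exact ⟨by rw [h2.1, h1.1]; ring, h2.2⟩

-- overwrite fold: every step either writes the fixed value w at the observed position or leaves it
theorem foldl_get_write {ι : Type} (L : List ι) (step : List (List Int) → ι → List (List Int))
    (hit : ι → Bool) (w : Int) (P : List (List Int) → Prop) (m : List (List Int)) (pi pj : Int)
    (hP : P m)
    (hstep : ∀ m' x, P m' → x ∈ L →
      pvGet (step m' x) pi pj = (if hit x then w else pvGet m' pi pj) ∧ P (step m' x)) :
    pvGet (L.foldl step m) pi pj = (if L.any hit then w else pvGet m pi pj) ∧ P (L.foldl step m) := by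
  induction L generalizing m with
  | nil => exact ⟨by simp, hP⟩
  | cons x xs ih =>
    have h1 := hstep m x hP (by simp)
    have h2 := ih (step m x) h1.2 (fun m' y hy hmem => hstep m' y hy (by simp [hmem]))
    refine ⟨?_, h2.2⟩
    rw [List.foldl_cons] at *
    rw [h2.1, h1.1]
    by_cases hx : hit x <;> by_cases hxs : xs.any hit <;> simp [hx, hxs]

-- sum of a two-indicator function over the whole grid -----------------------

theorem sum_map_ite_int (L : List Int) (hnd : L.Nodup) (a x : Int) :
    (L.map (fun z => if z = a then x else 0)).sum = if a ∈ L then x else 0 := by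
  induction L with
  | nil => simp
  | cons y ys ih =>
    rcases List.nodup_cons.mp hnd with ⟨hy, hys⟩
    by_cases h : y = a
    · subst h
      simp [ih hys, hy]
    · simp only [List.map_cons, List.sum_cons, if_neg h, zero_add, ih hys, List.mem_cons]
      have hne : ¬a = y := fun he => h (Eq.symm he)
      simp [hne]

theorem grid_sum_pair (degrees : List Int) (R : Int) (F : Int → Int → Int)
    (a1 a2 b1 b2 x y : Int)
    (hF : ∀ r c, 0 ≤ r → r < R → 0 ≤ c → c < pvDeg degrees r →
      F r c = (if r = a1 ∧ c = a2 then x else 0) + (if r = b1 ∧ c = b2 then y else 0)) :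
    ((PySem.List.pyRange 0 R).map (fun r =>
        ((PySem.List.pyRange 0 (pvDeg degrees r)).map (fun c => F r c)).sum)).sum
    = (if 0 ≤ a1 ∧ a1 < R ∧ 0 ≤ a2 ∧ a2 < pvDeg degrees a1 then x else 0)
    + (if 0 ≤ b1 ∧ b1 < R ∧ 0 ≤ b2 ∧ b2 < pvDeg degrees b1 then y else 0) := by
  have hinner : ∀ r : Int, 0 ≤ r → r < R →
      ((PySem.List.pyRange 0 (pvDeg degrees r)).map (fun c => F r c)).sum
      = (if r = a1 then (if 0 ≤ a2 ∧ a2 < pvDeg degrees a1 then x else 0) else 0)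
      + (if r = b1 then (if 0 ≤ b2 ∧ b2 < pvDeg degrees b1 then y else 0) else 0) := by
    intro r hr0 hrR
    have h1 : ((PySem.List.pyRange 0 (pvDeg degrees r)).map (fun c => F r c)).sum
        = ((PySem.List.pyRange 0 (pvDeg degrees r)).map (fun c =>
            (if c = a2 then (if r = a1 then x else 0) else 0)
            + (if c = b2 then (if r = b1 then y else 0) else 0))).sum := by
      apply congrArg
      apply List.map_congr_left
      intro c hc
      rcases PySem.List.mem_pyRange_one.mp hc with ⟨hc0, hcd⟩
      rw [hF r c hr0 hrR hc0 hcd]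
      by_cases e1 : r = a1 <;> by_cases e2 : c = a2 <;> by_cases e3 : r = b1 <;>
        by_cases e4 : c = b2 <;> simp [e1, e2, e3, e4] <;> split_ifs <;> tauto
    rw [h1, PySem.List.sum_map_add_int,
      sum_map_ite_int _ (PySem.List.nodup_pyRange_one 0 _) _ _,
      sum_map_ite_int _ (PySem.List.nodup_pyRange_one 0 _) _ _]
    by_cases e1 : r = a1 <;> by_cases e3 : r = b1 <;> (try subst e1) <;> (try subst e3) <;>
      simp [PySem.List.mem_pyRange_one] <;> split_ifs <;> tauto
  have h2 : ((PySem.List.pyRange 0 R).map (fun r =>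
        ((PySem.List.pyRange 0 (pvDeg degrees r)).map (fun c => F r c)).sum)).sum
      = ((PySem.List.pyRange 0 R).map (fun r =>
          (if r = a1 then (if 0 ≤ a2 ∧ a2 < pvDeg degrees a1 then x else 0) else 0)
          + (if r = b1 then (if 0 ≤ b2 ∧ b2 < pvDeg degrees b1 then y else 0) else 0))).sum := by
    apply congrArg
    apply List.map_congr_left
    intro r hrm
    rcases PySem.List.mem_pyRange_one.mp hrm with ⟨hr0, hrR⟩
    exact hinner r hr0 hrR
  rw [h2, PySem.List.sum_map_add_int,
    sum_map_ite_int _ (PySem.List.nodup_pyRange_one 0 _) _ _,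
    sum_map_ite_int _ (PySem.List.nodup_pyRange_one 0 _) _ _]
  simp only [PySem.List.mem_pyRange_one]
  by_cases e1 : 0 ≤ a1 ∧ a1 < R <;> by_cases e2 : 0 ≤ b1 ∧ b1 < R <;>
    by_cases e3 : 0 ≤ a2 ∧ a2 < pvDeg degrees a1 <;>
    by_cases e4 : 0 ≤ b2 ∧ b2 < pvDeg degrees b1 <;>
    simp [e1, e2, e3, e4]

-- shape bookkeeping ---------------------------------------------------------

theorem len_of_shape {a b : List (List Int)} (h : a.map List.length = b.map List.length) :
    a.length = b.length := by
  have := congrArg List.length h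
  simpa using this

theorem row_len_of_shape {a b : List (List Int)} (h : a.map List.length = b.map List.length)
    {r : Int} (hr : 0 ≤ r) : (pvGetRow a r).length = (pvGetRow b r).length := by
  have hl := len_of_shape h
  rw [pvGetRow_eq a hr, pvGetRow_eq b hr]
  by_cases hlt : r.toNat < a.length
  · have h1 : (a.map List.length)[r.toNat]? = (b.map List.length)[r.toNat]? := by rw [h]
    rw [List.getElem?_map, List.getElem?_map, List.getElem?_eq_getElem hlt,
      List.getElem?_eq_getElem (by omega : r.toNat < b.length)] at h1
    simp only [Option.map_some, Option.some.injEq] at h1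
    simp [List.getElem?_eq_getElem hlt, List.getElem?_eq_getElem (by omega : r.toNat < b.length), h1]
  · rw [List.getElem?_eq_none (by omega), List.getElem?_eq_none (by omega)]

def pvShape (degrees : List Int) (R : Int) : List Nat :=
  (PySem.List.pyRange 0 R).map (fun r => (pvDeg degrees r).toNat)

theorem shaped_bounds (degrees : List Int) (R : Int) (m : List (List Int))
    (hm : m.map List.length = pvShape degrees R) {r c : Int}
    (hr : 0 ≤ r) (hrR : r < R) (hc : 0 ≤ c) (hcd : c < pvDeg degrees r) :
    r.toNat < m.length ∧ c.toNat < (pvGetRow m r).length := by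
  have hlen : m.length = (R - 0).toNat := by
    have := congrArg List.length hm
    simpa [pvShape, PySem.List.length_pyRange_one] using this
  have hrm : r.toNat < m.length := by omega
  refine ⟨hrm, ?_⟩
  have h1 : (m.map List.length)[r.toNat]? = (pvShape degrees R)[r.toNat]? := by rw [hm]
  rw [List.getElem?_map, List.getElem?_eq_getElem hrm] at h1
  have h2 : (pvShape degrees R)[r.toNat]? = some ((pvDeg degrees r).toNat) := by
    rw [pvShape, List.getElem?_map, PySem.List.getElem?_pyRange_one,
      if_pos (by omega : r.toNat < (R - 0).toNat)]
    have he : (0 : Int) + ↑r.toNat = r := by omega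
    rw [Option.map_some, he]
  rw [h2] at h1
  simp only [Option.map_some, Option.some.injEq] at h1
  have hrow : pvGetRow m r = m[r.toNat] := by
    rw [pvGetRow_eq m hr, List.getElem?_eq_getElem hrm]; rfl
  rw [hrow, h1]
  omega

-- step / cell characterization ----------------------------------------------

theorem pvGet_pvStepDir (tanks : List (List Int)) (degrees : List Int) (R : Int)
    {r c : Int} (d : Int × Int) {pi pj : Int} (m : List (List Int))
    (hm : m.map List.length = pvShape degrees R)
    (hr : 0 ≤ r) (hrR : r < R) (hc : 0 ≤ c) (hcd : c < pvDeg degrees r)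
    (hpi : 0 ≤ pi) (hpj : 0 ≤ pj) :
    pvGet (pvStepDir tanks degrees R r c m d) pi pj
      = pvGet m pi pj + pvContribD tanks degrees R r c d pi pj ∧
    (pvStepDir tanks degrees R r c m d).map List.length = pvShape degrees R := by
  rw [pvStepDir, pvContribD]
  by_cases hg : 0 ≤ r + d.1 ∧ r + d.1 < R ∧ 0 ≤ c + d.2 ∧ c + d.2 < pvDeg degrees (r + d.1) ∧
      pvGet tanks (r + d.1) (c + d.2) < pvGet tanks r c
  · rw [if_pos hg, if_pos hg]
    by_cases hdf : 0 < PySem.Int.floordiv (pvGet tanks r c - pvGet tanks (r + d.1) (c + d.2)) 5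
    · rw [if_pos hdf, if_pos hdf]
      have hb1 := shaped_bounds degrees R m hm hr hrR hc hcd
      have hsh1 : (pvAdd2 m r c (-PySem.Int.floordiv (pvGet tanks r c - pvGet tanks (r + d.1) (c + d.2)) 5)).map List.length = pvShape degrees R := by
        rw [pvAdd2, shape_pvSet2 m _ _ hr, hm]
      have hb2 := shaped_bounds degrees R _ hsh1 hg.1 hg.2.1 hg.2.2.1 hg.2.2.2.1
      constructor
      · rw [pvGet_pvAdd2 _ pi pj _ hg.1 hg.2.2.1 hpi hpj hb2.1 hb2.2,
          pvGet_pvAdd2 _ pi pj _ hr hc hpi hpj hb1.1 hb1.2]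
        ring
      · rw [pvAdd2, shape_pvSet2 _ _ _ hg.1, hsh1]
    · rw [if_neg hdf, if_neg hdf]
      exact ⟨by ring, hm⟩
  · rw [if_neg hg, if_neg hg]
    exact ⟨by ring, hm⟩

theorem deltas_fold_char (tanks : List (List Int)) (degrees : List Int) (R : Int)
    (m0 : List (List Int)) (hm0 : m0.map List.length = pvShape degrees R)
    {pi pj : Int} (hpi : 0 ≤ pi) (hpj : 0 ≤ pj) :
    pvGet ((PySem.List.pyRange 0 R).foldl (fun acc r =>
        (PySem.List.pyRange 0 (pvDeg degrees r)).foldl (fun acc c =>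
          pvDirs.foldl (fun acc d => pvStepDir tanks degrees R r c acc d) acc) acc) m0) pi pj
      = pvGet m0 pi pj
      + ((PySem.List.pyRange 0 R).map (fun r =>
          ((PySem.List.pyRange 0 (pvDeg degrees r)).map (fun c =>
            pvContrib tanks degrees R r c pi pj)).sum)).sum := by
  have hmain := foldl_get_add (PySem.List.pyRange 0 R)
    (fun acc r => (PySem.List.pyRange 0 (pvDeg degrees r)).foldl (fun acc c =>
        pvDirs.foldl (fun acc d => pvStepDir tanks degrees R r c acc d) acc) acc)
    (fun r => ((PySem.List.pyRange 0 (pvDeg degrees r)).map (fun c =>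
        pvContrib tanks degrees R r c pi pj)).sum)
    (fun m => m.map List.length = pvShape degrees R) m0 pi pj hm0 ?_
  · exact hmain.1
  · intro m' r hm' hrmem
    rcases PySem.List.mem_pyRange_one.mp hrmem with ⟨hr0, hrR⟩
    have hinner := foldl_get_add (PySem.List.pyRange 0 (pvDeg degrees r))
      (fun acc c => pvDirs.foldl (fun acc d => pvStepDir tanks degrees R r c acc d) acc)
      (fun c => pvContrib tanks degrees R r c pi pj)
      (fun m => m.map List.length = pvShape degrees R) m' pi pj hm' ?_
    · exact ⟨hinner.1, hinner.2⟩
    · intro m'' cc hm'' hcmem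
      rcases PySem.List.mem_pyRange_one.mp hcmem with ⟨hc0, hcd⟩
      have hdirs := foldl_get_add pvDirs
        (fun acc d => pvStepDir tanks degrees R r cc acc d)
        (fun d => pvContribD tanks degrees R r cc d pi pj)
        (fun m => m.map List.length = pvShape degrees R) m'' pi pj hm'' ?_
      · exact ⟨hdirs.1, hdirs.2⟩
      · intro m3 d hm3 _
        exact pvGet_pvStepDir tanks degrees R d m3 hm3 hr0 hrR hc0 hcd hpi hpj

-- deltas0 --------------------------------------------------------------------

theorem deltas0_shape (degrees : List Int) (R : Int) :
    ((PySem.List.pyRange 0 R).map (fun r =>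
        PySem.List.pyRepeat [(0 : Int)] (pvDeg degrees r))).map List.length
      = pvShape degrees R := by
  rw [pvShape, List.map_map]
  apply List.map_congr_left
  intro r _
  simp [PySem.List.pyRepeat_singleton]

theorem deltas0_get (degrees : List Int) (R : Int) {pi pj : Int}
    (hpi : 0 ≤ pi) (hpj : 0 ≤ pj) :
    pvGet ((PySem.List.pyRange 0 R).map (fun r =>
        PySem.List.pyRepeat [(0 : Int)] (pvDeg degrees r))) pi pj = 0 := by
  rw [pvGet_eq _ hpi hpj]
  rcases h : ((PySem.List.pyRange 0 R).map (fun r =>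
      PySem.List.pyRepeat [(0 : Int)] (pvDeg degrees r)))[pi.toNat]? with _ | row
  · simp
  · have hrow : row ∈ (PySem.List.pyRange 0 R).map (fun r =>
        PySem.List.pyRepeat [(0 : Int)] (pvDeg degrees r)) := List.mem_of_getElem? h
    rcases List.mem_map.mp hrow with ⟨r, _, hr⟩
    rw [← hr] at *
    simp only [Option.getD_some]
    rw [PySem.List.pyRepeat_singleton]
    rcases h2 : (List.replicate (pvDeg degrees r).toNat (0 : Int))[pj.toNat]? with _ | z
    · simp
    · have := List.mem_of_getElem? h2
      rw [List.eq_of_mem_replicate this]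
      simp

-- the two-indicator normal form of pvContribD as a function of the cell (r,c) ----

theorem contribD_ind (tanks : List (List Int)) (degrees : List Int) (R : Int)
    (d1 d2 : Int) (hd : ¬(d1 = 0 ∧ d2 = 0)) (pi pj r c : Int) :
    pvContribD tanks degrees R r c (d1, d2) pi pj
    = (if r = pi ∧ c = pj then
        (if 0 ≤ pi + d1 ∧ pi + d1 < R ∧ 0 ≤ pj + d2 ∧ pj + d2 < pvDeg degrees (pi + d1) ∧
            pvGet tanks (pi + d1) (pj + d2) < pvGet tanks pi pj then
          (if 0 < PySem.Int.floordiv (pvGet tanks pi pj - pvGet tanks (pi + d1) (pj + d2)) 5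
           then -PySem.Int.floordiv (pvGet tanks pi pj - pvGet tanks (pi + d1) (pj + d2)) 5 else 0)
         else 0)
       else 0)
    + (if r = pi - d1 ∧ c = pj - d2 then
        (if 0 ≤ pi ∧ pi < R ∧ 0 ≤ pj ∧ pj < pvDeg degrees pi ∧
            pvGet tanks pi pj < pvGet tanks (pi - d1) (pj - d2) then
          (if 0 < PySem.Int.floordiv (pvGet tanks (pi - d1) (pj - d2) - pvGet tanks pi pj) 5
           then PySem.Int.floordiv (pvGet tanks (pi - d1) (pj - d2) - pvGet tanks pi pj) 5 else 0)
         else 0)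
       else 0) := by
  by_cases h1 : r = pi ∧ c = pj
  · obtain ⟨e1, e2⟩ := h1
    subst e1; subst e2
    have k2 : ¬(r = r - d1 ∧ c = c - d2) := by omega
    have k3 : ¬(r = r + d1 ∧ c = c + d2) := by omega
    simp [pvContribD, k2, hd]
  · by_cases h2 : r = pi - d1 ∧ c = pj - d2
    · obtain ⟨e1, e2⟩ := h2
      subst e1; subst e2
      have k0 : ¬(pi - d1 = pi ∧ pj - d2 = pj) := by omega
      have k1 : ¬(pi = pi - d1 ∧ pj = pj - d2) := by omega
      simp [pvContribD, k1, hd, sub_add_cancel]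
    · have k1 : ¬(pi = r ∧ pj = c) := fun hk => h1 ⟨hk.1.symm, hk.2.symm⟩
      have k2 : ¬(pi = r + d1 ∧ pj = c + d2) := by
        intro hk
        exact h2 ⟨by omega, by omega⟩
      simp [pvContribD, k1, k2, h1, h2]

-- combine, for one neighbour, the outflow indicator (from the cell itself) with the
-- inflow indicator (from that neighbour) into B's single three-way comparison
theorem neighbor_pair (P1 P2 P3 : Prop) [Decidable P1] [Decidable P2] [Decidable P3]
    (t u v w : Int) (hv : v = t - u) (hw : w = u - t) :
    (if P1 ∧ P2 ∧ P3 ∧ u < t then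
       (if 0 < PySem.Int.floordiv v 5 then -PySem.Int.floordiv v 5 else 0) else 0)
  + (if P1 ∧ P2 ∧ P3 then
       (if t < u then (if 0 < PySem.Int.floordiv w 5 then PySem.Int.floordiv w 5 else 0) else 0)
     else 0)
  = (if P1 ∧ P2 ∧ P3 then
       (if u < t then -PySem.Int.floordiv v 5
        else if t < u then PySem.Int.floordiv w 5 else 0)
     else 0) := by
  rw [PySem.Int.floordiv_eq_ediv_of_pos (by norm_num : (0:Int) < 5),
    PySem.Int.floordiv_eq_ediv_of_pos (by norm_num : (0:Int) < 5)]
  simp only [ite_and]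
  split_ifs <;> omega

theorem neighbor_pair2 (P1 P2 : Prop) [Decidable P1] [Decidable P2]
    (t u v w : Int) (hv : v = t - u) (hw : w = u - t) :
    (if P1 ∧ P2 ∧ u < t then
       (if 0 < PySem.Int.floordiv v 5 then -PySem.Int.floordiv v 5 else 0) else 0)
  + (if P1 ∧ P2 then
       (if t < u then (if 0 < PySem.Int.floordiv w 5 then PySem.Int.floordiv w 5 else 0) else 0)
     else 0)
  = (if P1 ∧ P2 then
       (if u < t then -PySem.Int.floordiv v 5
        else if t < u then PySem.Int.floordiv w 5 else 0)
     else 0) := by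
  rw [PySem.Int.floordiv_eq_ediv_of_pos (by norm_num : (0:Int) < 5),
    PySem.Int.floordiv_eq_ediv_of_pos (by norm_num : (0:Int) < 5)]
  simp only [ite_and]
  split_ifs <;> omega

theorem grid_sum_add (degrees : List Int) (R : Int) (F G : Int → Int → Int) :
    ((PySem.List.pyRange 0 R).map (fun r =>
        ((PySem.List.pyRange 0 (pvDeg degrees r)).map (fun c => F r c + G r c)).sum)).sum
    = ((PySem.List.pyRange 0 R).map (fun r =>
        ((PySem.List.pyRange 0 (pvDeg degrees r)).map (fun c => F r c)).sum)).sum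
    + ((PySem.List.pyRange 0 R).map (fun r =>
        ((PySem.List.pyRange 0 (pvDeg degrees r)).map (fun c => G r c)).sum)).sum := by
  rw [← PySem.List.sum_map_add_int]
  apply congrArg
  apply List.map_congr_left
  intro r _
  exact PySem.List.sum_map_add_int _ _ _

-- B's gathered delta as a plain sum of four neighbour terms
theorem pvDelta_eq (tanks : List (List Int)) (degrees : List Int) (R pi pj : Int) :
    pvDelta tanks degrees R pi pj
    = (if 0 ≤ pi - 1 ∧ pi - 1 < R ∧ 0 ≤ pj ∧ pj < pvDeg degrees (pi - 1) then
        (if pvGet tanks (pi - 1) pj < pvGet tanks pi pj then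
          -PySem.Int.floordiv (pvGet tanks pi pj - pvGet tanks (pi - 1) pj) 5
         else if pvGet tanks pi pj < pvGet tanks (pi - 1) pj then
          PySem.Int.floordiv (pvGet tanks (pi - 1) pj - pvGet tanks pi pj) 5 else 0) else 0)
    + ((if 0 ≤ pi + 1 ∧ pi + 1 < R ∧ 0 ≤ pj ∧ pj < pvDeg degrees (pi + 1) then
        (if pvGet tanks (pi + 1) pj < pvGet tanks pi pj then
          -PySem.Int.floordiv (pvGet tanks pi pj - pvGet tanks (pi + 1) pj) 5
         else if pvGet tanks pi pj < pvGet tanks (pi + 1) pj then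
          PySem.Int.floordiv (pvGet tanks (pi + 1) pj - pvGet tanks pi pj) 5 else 0) else 0)
    + ((if 0 ≤ pi ∧ pi < R ∧ 0 ≤ pj - 1 ∧ pj - 1 < pvDeg degrees pi then
        (if pvGet tanks pi (pj - 1) < pvGet tanks pi pj then
          -PySem.Int.floordiv (pvGet tanks pi pj - pvGet tanks pi (pj - 1)) 5
         else if pvGet tanks pi pj < pvGet tanks pi (pj - 1) then
          PySem.Int.floordiv (pvGet tanks pi (pj - 1) - pvGet tanks pi pj) 5 else 0) else 0)
    + (if 0 ≤ pi ∧ pi < R ∧ 0 ≤ pj + 1 ∧ pj + 1 < pvDeg degrees pi then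
        (if pvGet tanks pi (pj + 1) < pvGet tanks pi pj then
          -PySem.Int.floordiv (pvGet tanks pi pj - pvGet tanks pi (pj + 1)) 5
         else if pvGet tanks pi pj < pvGet tanks pi (pj + 1) then
          PySem.Int.floordiv (pvGet tanks pi (pj + 1) - pvGet tanks pi pj) 5 else 0) else 0))) := by
  have hstep : ∀ (s a b : Int),
      (if 0 ≤ a ∧ a < R ∧ 0 ≤ b ∧ b < pvDeg degrees a then
        (if pvGet tanks a b < pvGet tanks pi pj then
          s - PySem.Int.floordiv (pvGet tanks pi pj - pvGet tanks a b) 5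
         else if pvGet tanks pi pj < pvGet tanks a b then
          s + PySem.Int.floordiv (pvGet tanks a b - pvGet tanks pi pj) 5 else s) else s)
      = s + (if 0 ≤ a ∧ a < R ∧ 0 ≤ b ∧ b < pvDeg degrees a then
        (if pvGet tanks a b < pvGet tanks pi pj then
          -PySem.Int.floordiv (pvGet tanks pi pj - pvGet tanks a b) 5
         else if pvGet tanks pi pj < pvGet tanks a b then
          PySem.Int.floordiv (pvGet tanks a b - pvGet tanks pi pj) 5 else 0) else 0) := by
    intro s a b
    split_ifs <;> ring
  simp only [pvDelta, pvNeighbors, List.foldl_cons, List.foldl_nil]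
  rw [hstep, hstep, hstep, hstep]
  ring

theorem sum_contrib (tanks : List (List Int)) (degrees : List Int) (R pi pj : Int)
    (h1 : 0 ≤ pi) (h2 : pi < R) (h3 : 0 ≤ pj) (h4 : pj < pvDeg degrees pi) :
    ((PySem.List.pyRange 0 R).map (fun r =>
      ((PySem.List.pyRange 0 (pvDeg degrees r)).map (fun c =>
        pvContrib tanks degrees R r c pi pj)).sum)).sum
    = pvDelta tanks degrees R pi pj := by
  have hsplit : ∀ r c : Int, pvContrib tanks degrees R r c pi pj
      = pvContribD tanks degrees R r c (-1, 0) pi pj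
      + (pvContribD tanks degrees R r c (1, 0) pi pj
      + (pvContribD tanks degrees R r c (0, -1) pi pj
      + pvContribD tanks degrees R r c (0, 1) pi pj)) := by
    intro r c; simp [pvContrib, pvDirs]
  have hcongr : ((PySem.List.pyRange 0 R).map (fun r =>
      ((PySem.List.pyRange 0 (pvDeg degrees r)).map (fun c =>
        pvContrib tanks degrees R r c pi pj)).sum)).sum
      = ((PySem.List.pyRange 0 R).map (fun r =>
      ((PySem.List.pyRange 0 (pvDeg degrees r)).map (fun c =>
        pvContribD tanks degrees R r c (-1, 0) pi pj
        + (pvContribD tanks degrees R r c (1, 0) pi pj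
        + (pvContribD tanks degrees R r c (0, -1) pi pj
        + pvContribD tanks degrees R r c (0, 1) pi pj)))).sum)).sum := by
    apply congrArg
    apply List.map_congr_left
    intro r _
    apply congrArg
    apply List.map_congr_left
    intro c _
    exact hsplit r c
  rw [hcongr, grid_sum_add, grid_sum_add, grid_sum_add]
  rw [grid_sum_pair degrees R _ pi pj (pi - -1) (pj - 0) _ _
      (fun r c _ _ _ _ => contribD_ind tanks degrees R (-1) 0 (by omega) pi pj r c),
    grid_sum_pair degrees R _ pi pj (pi - 1) (pj - 0) _ _
      (fun r c _ _ _ _ => contribD_ind tanks degrees R 1 0 (by omega) pi pj r c),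
    grid_sum_pair degrees R _ pi pj (pi - 0) (pj - -1) _ _
      (fun r c _ _ _ _ => contribD_ind tanks degrees R 0 (-1) (by omega) pi pj r c),
    grid_sum_pair degrees R _ pi pj (pi - 0) (pj - 1) _ _
      (fun r c _ _ _ _ => contribD_ind tanks degrees R 0 1 (by omega) pi pj r c)]
  rw [pvDelta_eq]
  simp only [h1, h2, h3, h4, true_and, if_true, sub_zero, add_zero,
    sub_neg_eq_add, and_self]
  have hm1 : ∀ z : Int, z + -1 = z - 1 := fun z => by ring
  simp only [hm1]
  rw [← neighbor_pair (0 ≤ pi - 1) (pi - 1 < R) (pj < pvDeg degrees (pi - 1))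
      (pvGet tanks pi pj) (pvGet tanks (pi - 1) pj)
      (pvGet tanks pi pj - pvGet tanks (pi - 1) pj)
      (pvGet tanks (pi - 1) pj - pvGet tanks pi pj) rfl rfl,
    ← neighbor_pair (0 ≤ pi + 1) (pi + 1 < R) (pj < pvDeg degrees (pi + 1))
      (pvGet tanks pi pj) (pvGet tanks (pi + 1) pj)
      (pvGet tanks pi pj - pvGet tanks (pi + 1) pj)
      (pvGet tanks (pi + 1) pj - pvGet tanks pi pj) rfl rfl,
    ← neighbor_pair2 (0 ≤ pj - 1) (pj - 1 < pvDeg degrees pi)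
      (pvGet tanks pi pj) (pvGet tanks pi (pj - 1))
      (pvGet tanks pi pj - pvGet tanks pi (pj - 1))
      (pvGet tanks pi (pj - 1) - pvGet tanks pi pj) rfl rfl,
    ← neighbor_pair2 (0 ≤ pj + 1) (pj + 1 < pvDeg degrees pi)
      (pvGet tanks pi pj) (pvGet tanks pi (pj + 1))
      (pvGet tanks pi pj - pvGet tanks pi (pj + 1))
      (pvGet tanks pi (pj + 1) - pvGet tanks pi pj) rfl rfl]
  ring

-- writeback characterizations ------------------------------------------------

-- A's final loop adds deltas[r][c] to each grid cell
theorem writeA_char (tanks : List (List Int)) (degrees : List Int) (R : Int)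
    (dF : List (List Int))
    (hPre' : ∀ r : Int, 0 ≤ r → r < R → 0 < pvDeg degrees r →
      r.toNat < tanks.length ∧ pvDeg degrees r ≤ ((pvGetRow tanks r).length : Int))
    {pi pj : Int} (hpi : 0 ≤ pi) (hpj : 0 ≤ pj) :
    pvGet ((PySem.List.pyRange 0 R).foldl (fun acc r =>
        (PySem.List.pyRange 0 (pvDeg degrees r)).foldl (fun acc c =>
          pvAdd2 acc r c (pvGet dF r c)) acc) tanks) pi pj
      = pvGet tanks pi pj
        + (if 0 ≤ pi ∧ pi < R ∧ 0 ≤ pj ∧ pj < pvDeg degrees pi then pvGet dF pi pj else 0) ∧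
    ((PySem.List.pyRange 0 R).foldl (fun acc r =>
        (PySem.List.pyRange 0 (pvDeg degrees r)).foldl (fun acc c =>
          pvAdd2 acc r c (pvGet dF r c)) acc) tanks).map List.length
      = tanks.map List.length := by
  have hmain := foldl_get_add (PySem.List.pyRange 0 R)
    (fun acc r => (PySem.List.pyRange 0 (pvDeg degrees r)).foldl (fun acc c =>
        pvAdd2 acc r c (pvGet dF r c)) acc)
    (fun r => ((PySem.List.pyRange 0 (pvDeg degrees r)).map (fun c =>
        if pi = r ∧ pj = c then pvGet dF r c else 0)).sum)
    (fun m => m.map List.length = tanks.map List.length) tanks pi pj rfl ?_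
  · refine ⟨?_, hmain.2⟩
    rw [hmain.1]
    congr 1
    rw [grid_sum_pair degrees R _ pi pj pi pj (pvGet dF pi pj) 0 ?_]
    · simp
    · intro r c hr0 hrR hc0 hcd
      by_cases h : pi = r ∧ pj = c
      · obtain ⟨e1, e2⟩ := h
        subst e1; subst e2
        simp
      · have h' : ¬(r = pi ∧ c = pj) := fun hk => h ⟨hk.1.symm, hk.2.symm⟩
        simp [h, h']
  · intro m' r hm' hrmem
    rcases PySem.List.mem_pyRange_one.mp hrmem with ⟨hr0, hrR⟩
    have hinner := foldl_get_add (PySem.List.pyRange 0 (pvDeg degrees r))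
      (fun acc c => pvAdd2 acc r c (pvGet dF r c))
      (fun c => if pi = r ∧ pj = c then pvGet dF r c else 0)
      (fun m => m.map List.length = tanks.map List.length) m' pi pj hm' ?_
    · exact ⟨hinner.1, hinner.2⟩
    · intro m'' cc hm'' hcmem
      rcases PySem.List.mem_pyRange_one.mp hcmem with ⟨hc0, hcd⟩
      have hb := hPre' r hr0 hrR (by omega)
      have hrm : r.toNat < m''.length := by rw [len_of_shape hm'']; exact hb.1
      have hcm : cc.toNat < (pvGetRow m'' r).length := by
        rw [row_len_of_shape hm'' hr0]; omega
      refine ⟨pvGet_pvAdd2 m'' pi pj _ hr0 hc0 hpi hpj hrm hcm, ?_⟩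
      show (pvAdd2 m'' r cc (pvGet dF r cc)).map List.length = _
      rw [pvAdd2, shape_pvSet2 _ _ _ hr0, hm'']

-- B's final loop overwrites each grid cell with its new value
theorem writeB_char (tanks : List (List Int)) (degrees : List Int) (R : Int)
    (nV : List (List Int))
    (hPre' : ∀ r : Int, 0 ≤ r → r < R → 0 < pvDeg degrees r →
      r.toNat < tanks.length ∧ pvDeg degrees r ≤ ((pvGetRow tanks r).length : Int))
    {pi pj : Int} (hpi : 0 ≤ pi) (hpj : 0 ≤ pj) :
    pvGet ((PySem.List.pyRange 0 R).foldl (fun acc r =>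
        (PySem.List.pyRange 0 (pvDeg degrees r)).foldl (fun acc c =>
          pvSet2 acc r c (pvGet nV r c)) acc) tanks) pi pj
      = (if 0 ≤ pi ∧ pi < R ∧ 0 ≤ pj ∧ pj < pvDeg degrees pi then pvGet nV pi pj
         else pvGet tanks pi pj) ∧
    ((PySem.List.pyRange 0 R).foldl (fun acc r =>
        (PySem.List.pyRange 0 (pvDeg degrees r)).foldl (fun acc c =>
          pvSet2 acc r c (pvGet nV r c)) acc) tanks).map List.length
      = tanks.map List.length := by
  have hmain := foldl_get_write (PySem.List.pyRange 0 R)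
    (fun acc r => (PySem.List.pyRange 0 (pvDeg degrees r)).foldl (fun acc c =>
        pvSet2 acc r c (pvGet nV r c)) acc)
    (fun r => decide (pi = r ∧ 0 ≤ pj ∧ pj < pvDeg degrees r))
    (pvGet nV pi pj)
    (fun m => m.map List.length = tanks.map List.length) tanks pi pj rfl ?_
  · refine ⟨?_, hmain.2⟩
    rw [hmain.1]
    have hcond : ((PySem.List.pyRange 0 R).any
        (fun r => decide (pi = r ∧ 0 ≤ pj ∧ pj < pvDeg degrees r)) = true)
        ↔ (0 ≤ pi ∧ pi < R ∧ 0 ≤ pj ∧ pj < pvDeg degrees pi) := by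
      rw [List.any_eq_true]
      constructor
      · rintro ⟨r, hrmem, hr⟩
        rcases PySem.List.mem_pyRange_one.mp hrmem with ⟨hr0, hrR⟩
        rw [decide_eq_true_eq] at hr
        obtain ⟨e, h⟩ := hr
        subst e
        exact ⟨hr0, hrR, h⟩
      · rintro ⟨a, b, cdef⟩
        exact ⟨pi, PySem.List.mem_pyRange_one.mpr ⟨a, b⟩, by simp [cdef]⟩
    simp only [hcond]
  · intro m' r hm' hrmem
    rcases PySem.List.mem_pyRange_one.mp hrmem with ⟨hr0, hrR⟩
    have hinner := foldl_get_write (PySem.List.pyRange 0 (pvDeg degrees r))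
      (fun acc c => pvSet2 acc r c (pvGet nV r c))
      (fun c => decide (pi = r ∧ pj = c))
      (pvGet nV pi pj)
      (fun m => m.map List.length = tanks.map List.length) m' pi pj hm' ?_
    · refine ⟨?_, hinner.2⟩
      rw [hinner.1]
      have hcond : ((PySem.List.pyRange 0 (pvDeg degrees r)).any
          (fun c => decide (pi = r ∧ pj = c)) = true)
          ↔ (pi = r ∧ 0 ≤ pj ∧ pj < pvDeg degrees r) := by
        rw [List.any_eq_true]
        constructor
        · rintro ⟨c, hcmem, hc⟩
          rcases PySem.List.mem_pyRange_one.mp hcmem with ⟨hc0, hcd⟩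
          rw [decide_eq_true_eq] at hc
          obtain ⟨e1, e2⟩ := hc
          subst e2
          exact ⟨e1, hc0, hcd⟩
        · rintro ⟨e1, h2, h3⟩
          exact ⟨pj, PySem.List.mem_pyRange_one.mpr ⟨h2, h3⟩, by simp [e1]⟩
      simp only [hcond, decide_eq_true_eq]
    · intro m'' cc hm'' hcmem
      rcases PySem.List.mem_pyRange_one.mp hcmem with ⟨hc0, hcd⟩
      have hb := hPre' r hr0 hrR (by omega)
      have hrm : r.toNat < m''.length := by rw [len_of_shape hm'']; exact hb.1
      have hcm : cc.toNat < (pvGetRow m'' r).length := by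
        rw [row_len_of_shape hm'' hr0]; omega
      constructor
      · show pvGet (pvSet2 m'' r cc (pvGet nV r cc)) pi pj = _
        rw [pvGet_pvSet2 m'' pi pj _ hr0 hc0 hpi hpj hrm hcm]
        simp only [decide_eq_true_eq]
        by_cases h : pi = r ∧ pj = cc
        · rw [if_pos h, if_pos h, ← h.1, ← h.2]
        · rw [if_neg h, if_neg h]
      · show (pvSet2 m'' r cc (pvGet nV r cc)).map List.length = _
        rw [shape_pvSet2 _ _ _ hr0, hm'']

-- the value table B builds
theorem newVals_get (tanks : List (List Int)) (degrees : List Int)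
    {pi pj : Int} (hpi : 0 ≤ pi) (hpiR : pi < (degrees.length : Int))
    (hpj : 0 ≤ pj) (hpjd : pj < pvDeg degrees pi) :
    pvGet ((PySem.List.pyRange 0 (degrees.length : Int)).map (fun r =>
        (PySem.List.pyRange 0 (pvDeg degrees r)).map (fun c =>
          pvGet tanks r c + pvDelta tanks degrees (degrees.length : Int) r c))) pi pj
    = pvGet tanks pi pj + pvDelta tanks degrees (degrees.length : Int) pi pj := by
  have hti : ((pi.toNat : Int)) = pi := Int.toNat_of_nonneg hpi
  have htj : ((pj.toNat : Int)) = pj := Int.toNat_of_nonneg hpj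
  rw [pvGet_eq _ hpi hpj,
    PySem.List.getElem?_map_pyRange_zero _ degrees.length pi.toNat (by omega)]
  rw [Option.getD_some, hti, List.getElem?_map, PySem.List.getElem?_pyRange_one,
    if_pos (by omega : pj.toNat < (pvDeg degrees pi - 0).toNat)]
  rw [Option.map_some, Option.getD_some, zero_add, htj]

theorem pvGet_nat (m : List (List Int)) (i j : Nat) :
    pvGet m (i : Int) (j : Int) = ((m[i]?.getD [])[j]?).getD 0 := by
  rw [pvGet_eq m (by positivity) (by positivity)]
  simp

theorem pvGetRow_nat (m : List (List Int)) (i : Nat) :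
    pvGetRow m (i : Int) = (m[i]?).getD [] := by
  rw [pvGetRow_eq m (by positivity)]
  simp

theorem ports_eq (tanks : List (List Int)) (degrees : List Int)
    (hPre' : ∀ r : Int, 0 ≤ r → r < (degrees.length : Int) → 0 < pvDeg degrees r →
      r.toNat < tanks.length ∧ pvDeg degrees r ≤ ((pvGetRow tanks r).length : Int)) :
    adjust_fishes tanks degrees = adjust_fishes_alt tanks degrees := by
  simp only [adjust_fishes, adjust_fishes_alt]
  set R : Int := (degrees.length : Int) with hRdef
  set D : List (List Int) := (PySem.List.pyRange 0 R).foldl (fun acc r =>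
      (PySem.List.pyRange 0 (pvDeg degrees r)).foldl (fun acc c =>
        pvDirs.foldl (fun acc d => pvStepDir tanks degrees R r c acc d) acc) acc)
      ((PySem.List.pyRange 0 R).map (fun r => PySem.List.pyRepeat [(0 : Int)] (pvDeg degrees r)))
    with hDdef
  set nV : List (List Int) := (PySem.List.pyRange 0 R).map (fun r =>
      (PySem.List.pyRange 0 (pvDeg degrees r)).map (fun c =>
        pvGet tanks r c + pvDelta tanks degrees R r c)) with hnVdef
  set A : List (List Int) := (PySem.List.pyRange 0 R).foldl (fun acc r =>
      (PySem.List.pyRange 0 (pvDeg degrees r)).foldl (fun acc c =>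
        pvAdd2 acc r c (pvGet D r c)) acc) tanks with hAdef
  set B : List (List Int) := (PySem.List.pyRange 0 R).foldl (fun acc r =>
      (PySem.List.pyRange 0 (pvDeg degrees r)).foldl (fun acc c =>
        pvSet2 acc r c (pvGet nV r c)) acc) tanks with hBdef
  -- the accumulated deltas equal B's gathered per-cell delta on every grid cell
  have hD : ∀ pi pj : Int, 0 ≤ pi → pi < R → 0 ≤ pj → pj < pvDeg degrees pi →
      pvGet D pi pj = pvDelta tanks degrees R pi pj := by
    intro pi pj h1 h2 h3 h4
    rw [hDdef, deltas_fold_char tanks degrees R _ (deltas0_shape degrees R) h1 h3,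
      deltas0_get degrees R h1 h3, zero_add]
    exact sum_contrib tanks degrees R pi pj h1 h2 h3 h4
  have hA := fun (i j : Nat) =>
    writeA_char tanks degrees R D hPre' (pi := (i : Int)) (pj := (j : Int))
      (by positivity) (by positivity)
  have hB := fun (i j : Nat) =>
    writeB_char tanks degrees R nV hPre' (pi := (i : Int)) (pj := (j : Int))
      (by positivity) (by positivity)
  have hshA : A.map List.length = tanks.map List.length := (hA 0 0).2
  have hshB : B.map List.length = tanks.map List.length := (hB 0 0).2
  have hlenA : A.length = tanks.length := len_of_shape hshA
  have hlenB : B.length = tanks.length := len_of_shape hshB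
  -- pointwise equality of the two results
  have hget : ∀ i j : Nat, pvGet A (i : Int) (j : Int) = pvGet B (i : Int) (j : Int) := by
    intro i j
    rw [(hA i j).1, (hB i j).1]
    by_cases hOK : 0 ≤ (i : Int) ∧ (i : Int) < R ∧ 0 ≤ (j : Int) ∧ (j : Int) < pvDeg degrees (i : Int)
    · rw [if_pos hOK, if_pos hOK, hnVdef,
        newVals_get tanks degrees hOK.1 hOK.2.1 hOK.2.2.1 hOK.2.2.2,
        hD (i : Int) (j : Int) hOK.1 hOK.2.1 hOK.2.2.1 hOK.2.2.2]
    · rw [if_neg hOK, if_neg hOK, add_zero]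
  apply List.ext_getElem?
  intro i
  by_cases hi : i < tanks.length
  · rw [List.getElem?_eq_getElem (by omega : i < A.length),
      List.getElem?_eq_getElem (by omega : i < B.length)]
    apply congrArg
    apply List.ext_getElem?
    intro j
    have hrowA : A[i] = pvGetRow A (i : Int) := by
      rw [pvGetRow_nat, List.getElem?_eq_getElem (by omega : i < A.length)]; rfl
    have hrowB : B[i] = pvGetRow B (i : Int) := by
      rw [pvGetRow_nat, List.getElem?_eq_getElem (by omega : i < B.length)]; rfl
    have hrlen : A[i].length = B[i].length := by
      rw [hrowA, hrowB, row_len_of_shape hshA (by positivity),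
        row_len_of_shape hshB (by positivity)]
    by_cases hj : j < A[i].length
    · rw [List.getElem?_eq_getElem hj, List.getElem?_eq_getElem (by omega : j < B[i].length)]
      have hvA : A[i][j] = pvGet A (i : Int) (j : Int) := by
        rw [pvGet_nat, List.getElem?_eq_getElem (by omega : i < A.length), Option.getD_some,
          List.getElem?_eq_getElem hj, Option.getD_some]
      have hvB : B[i][j] = pvGet B (i : Int) (j : Int) := by
        rw [pvGet_nat, List.getElem?_eq_getElem (by omega : i < B.length), Option.getD_some,
          List.getElem?_eq_getElem (by omega : j < B[i].length), Option.getD_some]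
      rw [Option.some.injEq, hvA, hvB]
      exact hget i j
    · rw [List.getElem?_eq_none (by omega), List.getElem?_eq_none (by omega)]
  · rw [List.getElem?_eq_none (by omega), List.getElem?_eq_none (by omega)]

-- ===== VERDICT (by name: the statement is the Claim_ definition above) =====
theorem adjust_fishes_spec : Claim_equal_adjust_fishes := by
  intro rotated_tanks degrees _ hPre
  unfold Spec_adjust_fishes
  apply ports_eq
  intro r h0 hR hpos
  have hti : ((r.toNat : Int)) = r := Int.toNat_of_nonneg h0
  have h := hPre r.toNat (by omega) (by rw [hti]; exact hpos)
  rw [hti] at h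
  exact h
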